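-- pv_equiv track=rewrite | github.com/Rezaahang/OpenEntrance_DR_preparing_data | data_gathering_run.py | expert_scenario
-- ===== SOURCE A (Python) =====
-- def  expert_scenario(num):
--     for i in range(1,13):
--         if 1*i<= num <= 24*i:
--             for n in [1,4,7,10]:
--                 if i == n:
--                     return 'scenario1'
--             for n in [2,5,8,11]:
--                 if i == n:
--                     return 'scenario2'
--             for n in [3,6,9,12]:
--                 if i == n:
--                     return 'scenario3'
--         else:
--             pass
-- ===== SOURCE B (Python) =====
-- def expert_scenario(num):
--     # closed form: smallest i in 1..12 with i <= num <= 24*i is i = max(1, ceil(num/24))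
--     i = max(1, -(-num // 24))
--     if i <= 12 and i <= num:
--         r = i % 3
--         if r == 1:
--             return 'scenario1'
--         if r == 2:
--             return 'scenario2'
--         return 'scenario3'
--     return None
-- ===== Notes on version B (the rewrite author's own statement) =====
-- stated objective: simpler
-- what changed: Replaced the twelve-iteration scan with its three inner membership loops by a closed form: the smallest qualifying index is computed by ceiling division of num by the window width, validated by two comparisons, and mapped to its scenario by remainder mod three.
import Mathlib
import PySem

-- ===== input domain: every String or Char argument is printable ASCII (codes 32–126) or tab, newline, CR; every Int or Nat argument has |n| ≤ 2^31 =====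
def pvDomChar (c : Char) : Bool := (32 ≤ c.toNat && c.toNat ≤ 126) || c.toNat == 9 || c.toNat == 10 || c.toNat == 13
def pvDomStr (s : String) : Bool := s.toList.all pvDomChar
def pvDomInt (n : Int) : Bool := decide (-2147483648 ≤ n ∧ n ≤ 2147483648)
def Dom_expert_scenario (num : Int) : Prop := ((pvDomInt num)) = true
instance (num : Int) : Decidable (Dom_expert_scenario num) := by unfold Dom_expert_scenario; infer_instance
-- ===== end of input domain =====

-- B replaces A's 12-iteration scan (with three inner membership loops) by a closed-form
-- ceiling-division computation of the matching index; objective: simpler.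

-- ===== PORT A =====
-- one step of the outer 'for i in range(1,13)' loop: once a value is returned it is kept
def expert_scenario_step (num : Int) (acc : Option String) (i : Int) : Option String :=
  match acc with
  | some r => some r
  | none =>
    if 1 * i ≤ num ∧ num ≤ 24 * i then
      -- for n in [1,4,7,10]: if i == n: return 'scenario1'
      match ([1, 4, 7, 10] : List Int).foldl
          (fun a n => match a with
            | some r => some r
            | none => if i == n then some "scenario1" else none) none with
      | some r => some r
      | none =>
        -- for n in [2,5,8,11]: if i == n: return 'scenario2'
        match ([2, 5, 8, 11] : List Int).foldl
            (fun a n => match a with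
              | some r => some r
              | none => if i == n then some "scenario2" else none) none with
        | some r => some r
        | none =>
          -- for n in [3,6,9,12]: if i == n: return 'scenario3'
          ([3, 6, 9, 12] : List Int).foldl
            (fun a n => match a with
              | some r => some r
              | none => if i == n then some "scenario3" else none) none
    else none

def expert_scenario (num : Int) : Option String :=
  (PySem.List.pyRange 1 13 1).foldl (expert_scenario_step num) none

-- ===== PORT B =====
def expert_scenario_alt (num : Int) : Option String :=
  let i := max 1 (-(PySem.Int.floordiv (-num) 24))
  if i ≤ 12 ∧ i ≤ num then
    let r := PySem.Int.mod i 3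
    if r = 1 then some "scenario1"
    else if r = 2 then some "scenario2"
    else some "scenario3"
  else none

-- ===== PRECONDITION & SPEC =====
def Spec_expert_scenario (num : Int) (out : Option String) : Prop := out = expert_scenario_alt num
instance (num : Int) (out : Option String) : Decidable (Spec_expert_scenario num out) := by unfold Spec_expert_scenario; infer_instance

-- ===== CLAIM (what is proved, stated in full; the proofs are below) =====
def Claim_equal_expert_scenario : Prop := ∀ (num : Int), Dom_expert_scenario num → Spec_expert_scenario num (expert_scenario num)

-- ===== LEMMAS AND PROOFS =====

-- if no i in the range satisfies the window condition, A's outer fold stays none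
theorem expert_scenario_fold_none (num : Int) (l : List Int)
    (h : ∀ i ∈ l, ¬(1 * i ≤ num ∧ num ≤ 24 * i)) :
    l.foldl (expert_scenario_step num) none = none := by
  induction l with
  | nil => rfl
  | cons a t ih =>
    have ha := h a (List.mem_cons_self ..)
    simp only [List.foldl_cons, expert_scenario_step, if_neg ha]
    exact ih (fun i hi => h i (List.mem_cons_of_mem _ hi))

theorem expert_scenario_alt_none (num : Int) (h : num < 1 ∨ 288 < num) :
    expert_scenario_alt num = none := by
  unfold expert_scenario_alt
  rw [PySem.Int.floordiv_eq_ediv_of_pos (by norm_num)]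
  simp only [max_le_iff, PySem.Int.mod]
  rw [if_neg (by omega)]

-- ===== VERDICT (by name: the statement is the Claim_ definition above) =====
theorem expert_scenario_spec : Claim_equal_expert_scenario := by
  intro num _
  unfold Spec_expert_scenario
  by_cases h : 1 ≤ num ∧ num ≤ 288
  · obtain ⟨h1, h2⟩ := h
    interval_cases num <;> decide
  · rw [expert_scenario_alt_none num (by omega)]
    apply expert_scenario_fold_none
    intro i hi
    have hb := (PySem.List.mem_pyRange_one).1 hi
    omega
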